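-- pv_equiv track=rewrite | github.com/cramirezpuaemex/System-CR-GL | Diezmado.py | proceso
-- ===== SOURCE A (Python) =====
-- def proceso(senal, valor):
--
--
--
-- 	for j in range(2):
-- 		aux=[]
-- 		for i in range(len(senal)):
-- 			if i % 2 == 0:
-- 				aux.append(senal[i])
-- 		senal=aux
--
-- 	return senal
-- ===== SOURCE B (Python) =====
-- def proceso(senal, valor):
-- 	return [senal[i] for i in range(0, len(senal), 4)]
-- ===== Notes on version B (the rewrite author's own statement) =====
-- stated objective: simpler
-- what changed: Replaces A's two sequential even-index filtering passes (each building an intermediate list) with a single strided comprehension over indices 0,4,8,...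
import Mathlib
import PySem

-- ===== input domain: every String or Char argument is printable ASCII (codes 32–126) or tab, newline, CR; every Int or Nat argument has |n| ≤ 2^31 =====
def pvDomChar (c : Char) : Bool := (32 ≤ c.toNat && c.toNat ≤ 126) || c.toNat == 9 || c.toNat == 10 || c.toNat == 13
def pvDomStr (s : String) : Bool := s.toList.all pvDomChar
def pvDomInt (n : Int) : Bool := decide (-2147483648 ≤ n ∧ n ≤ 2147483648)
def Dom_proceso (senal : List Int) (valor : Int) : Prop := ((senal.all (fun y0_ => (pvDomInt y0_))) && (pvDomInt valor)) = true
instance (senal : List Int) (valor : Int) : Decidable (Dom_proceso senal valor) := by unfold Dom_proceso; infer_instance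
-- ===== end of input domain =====

-- B replaces A's two sequential even-index filtering passes with one strided comprehension over indices 0,4,8,… (simpler).


-- ===== PORT A =====
-- inner loop: aux = []; for i in range(len(senal)): if i % 2 == 0: aux.append(senal[i])
def procesoPass (senal : List Int) : List Int :=
  (PySem.List.pyRange 0 senal.length 1).foldl
    (fun aux i => if PySem.Int.mod i 2 == 0 then aux ++ [PySem.List.pyGetD senal i 0] else aux) []

-- for j in range(2): senal = <inner loop>; return senal
def proceso (senal : List Int) (valor : Int) : List Int :=
  (List.range 2).foldl (fun senal _ => procesoPass senal) senal

-- ===== PORT B =====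
-- return [senal[i] for i in range(0, len(senal), 4)]
def proceso_alt (senal : List Int) (valor : Int) : List Int :=
  (PySem.List.pyRange 0 senal.length 4).map (fun i => PySem.List.pyGetD senal i 0)

-- ===== PRECONDITION & SPEC =====
def Spec_proceso (senal : List Int) (valor : Int) (out : List Int) : Prop := out = proceso_alt senal valor
instance (senal : List Int) (valor : Int) (out : List Int) : Decidable (Spec_proceso senal valor out) := by unfold Spec_proceso; infer_instance

-- ===== CLAIM (what is proved, stated in full; the proofs are below) =====
def Claim_equal_proceso : Prop := ∀ (senal : List Int) (valor : Int), Dom_proceso senal valor → Spec_proceso senal valor (proceso senal valor)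

-- ===== LEMMAS AND PROOFS =====

-- every-other element (what one even-index pass keeps)
def eo : List Int → List Int
  | [] => []
  | [a] => [a]
  | a :: _ :: r => a :: eo r

-- every fourth element
def e4 : List Int → List Int
  | [] => []
  | [a] => [a]
  | [a, _] => [a]
  | [a, _, _] => [a]
  | a :: _ :: _ :: _ :: r => a :: e4 r

lemma e4_eq_eo_eo : ∀ xs : List Int, e4 xs = eo (eo xs) := by
  intro xs
  induction xs using e4.induct with
  | case1 => rfl
  | case2 a => rfl
  | case3 a b => rfl
  | case4 a b c => rfl
  | case5 a b c d r ih => simp [e4, eo, ih]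

lemma range_filter_even_map (xs : List Int) :
    ((List.range xs.length).filter (fun k => k % 2 == 0)).map (fun k => xs.getD k 0) = eo xs := by
  induction xs using eo.induct with
  | case1 => rfl
  | case2 a => rfl
  | case3 a b r ih =>
    have hrange : List.range (r.length + 2) = 0 :: 1 :: (List.range r.length).map (fun k => k + 2) := by
      rw [List.range_succ_eq_map, List.range_succ_eq_map]
      simp [List.map_map, Function.comp_def]
    simp only [List.length_cons]
    rw [show r.length + 1 + 1 = r.length + 2 by omega, hrange]
    simp only [List.filter_cons, List.filter_map]
    have hpf : (List.range r.length).filter ((fun k => k % 2 == 0) ∘ fun k => k + 2)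
        = (List.range r.length).filter (fun k => k % 2 == 0) := by
      apply List.filter_congr
      intro k _
      simp [Function.comp, Nat.add_mod_right]
    norm_num [hpf, List.map_map, Function.comp_def, eo]
    rw [← ih]
    apply List.map_congr_left
    intro k _
    rfl

lemma procesoPass_eq_eo (xs : List Int) : procesoPass xs = eo xs := by
  unfold procesoPass
  rw [PySem.List.foldl_append_if, PySem.List.pyRange_one]
  rw [show ((xs.length : Int) - 0).toNat = xs.length by omega]
  rw [List.filter_map, List.map_map]
  have hf : (List.range xs.length).filter ((fun i => PySem.Int.mod i 2 == 0) ∘ (fun k : ℕ => (0 : Int) + (k : Int)))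
      = (List.range xs.length).filter (fun k : ℕ => k % 2 == 0) := by
    apply List.filter_congr
    intro k _
    simp only [Function.comp_apply, zero_add]
    have hmod : PySem.Int.mod (k : Int) 2 = ((k % 2 : Nat) : Int) := by
      exact_mod_cast PySem.Int.mod_natCast k 2
    rw [hmod, Bool.eq_iff_iff]
    simp only [beq_iff_eq, Nat.cast_eq_zero]
  rw [hf, ← range_filter_even_map]
  simp only [List.nil_append]
  apply List.map_congr_left
  intro k _
  simp only [Function.comp_apply, zero_add, PySem.List.pyGetD_natCast]

lemma proceso_eq_e4 (xs : List Int) (v : Int) : proceso xs v = eo (eo xs) := by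
  simp [proceso, List.range_succ, procesoPass_eq_eo]

lemma range_div4_map (xs : List Int) :
    (List.range ((xs.length + 3) / 4)).map (fun k => xs.getD (4 * k) 0) = e4 xs := by
  induction xs using e4.induct with
  | case1 => simp [e4]
  | case2 a => simp [e4, List.range_one]
  | case3 a b => simp [e4, List.range_one]
  | case4 a b c => simp [e4, List.range_one]
  | case5 a b c d r ih =>
    simp only [List.length_cons]
    rw [show (r.length + 1 + 1 + 1 + 1 + 3) / 4 = (r.length + 3) / 4 + 1 by omega]
    rw [List.range_succ_eq_map]
    simp only [List.map_cons, List.map_map, Function.comp_def]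
    have hstep : ∀ m : ℕ, (a :: b :: c :: d :: r).getD (4 * (m + 1)) 0 = r.getD (4 * m) 0 := by
      intro m
      rw [show 4 * (m + 1) = 4 * m + 1 + 1 + 1 + 1 by ring]
      simp
    have htail : (List.range ((r.length + 3) / 4)).map (fun m => (a :: b :: c :: d :: r).getD (4 * (m + 1)) 0)
        = (List.range ((r.length + 3) / 4)).map (fun m => r.getD (4 * m) 0) := by
      apply List.map_congr_left
      intro m _
      exact hstep m
    rw [htail, ih]
    simp [e4]

lemma proceso_alt_eq_e4 (xs : List Int) (v : Int) : proceso_alt xs v = e4 xs := by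
  unfold proceso_alt
  rw [PySem.List.pyRange_of_pos 0 _ (by norm_num : (0:Int) < 4)]
  have hm : (if (0 : Int) < (xs.length : Int) then (((xs.length : Int) - 0 + 4 - 1) / 4).toNat else 0)
      = (xs.length + 3) / 4 := by
    split_ifs with h <;> omega
  rw [hm, List.map_map, ← range_div4_map]
  apply List.map_congr_left
  intro k _
  simp only [Function.comp_apply, zero_add]
  rw [show (4 : Int) * (k : Int) = ((4 * k : Nat) : Int) by push_cast; ring]
  rw [PySem.List.pyGetD_natCast]

-- ===== VERDICT (by name: the statement is the Claim_ definition above) =====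
theorem proceso_spec : Claim_equal_proceso := by
  intro xs v _
  unfold Spec_proceso
  rw [proceso_eq_e4, proceso_alt_eq_e4, e4_eq_eo_eo]
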